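-- pv_equiv track=rewrite | github.com/Heb2100/Codingtest | 코드포스/divisorChain.py | step1
-- ===== SOURCE A (Python) =====
-- def step1(input, binary, length):
--     answer = []
--     answer.append(input)
--     for i in range(length - 1, 0, -1):
--         if int(binary[i]) == 1:
--             input = input - 2**(length - i-1)
--             answer.append(input)
--     return answer
-- ===== SOURCE B (Python) =====
-- def _binval(bits):
--     v = 0
--     for b in bits:
--         v = 2 * v + b
--     return v
--
--
-- def step1(input, binary, length):
--     # Positional algorithm: no running subtraction across iterations -- each
--     # output element is computed independently as input minus the base-2
--     # numeric value of the suffix of bits already scanned at that point.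
--     bits = [1 if ch == '1' else 0 for ch in binary[:length]]
--     return [input] + [input - _binval(bits[i:])
--                       for i in range(length - 1, 0, -1) if binary[i] == '1']
-- ===== Notes on version B (the rewrite author's own statement) =====
-- stated objective: alternative
-- what changed: Replaces A's stateful loop (a running value mutated and appended across iterations) by a positional algorithm: build the 0/1 bit table of binary[:length] once, then compute every output element independently as input minus the base-2 (Horner) value of the suffix of bits already scanned at that point.
import Mathlib
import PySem

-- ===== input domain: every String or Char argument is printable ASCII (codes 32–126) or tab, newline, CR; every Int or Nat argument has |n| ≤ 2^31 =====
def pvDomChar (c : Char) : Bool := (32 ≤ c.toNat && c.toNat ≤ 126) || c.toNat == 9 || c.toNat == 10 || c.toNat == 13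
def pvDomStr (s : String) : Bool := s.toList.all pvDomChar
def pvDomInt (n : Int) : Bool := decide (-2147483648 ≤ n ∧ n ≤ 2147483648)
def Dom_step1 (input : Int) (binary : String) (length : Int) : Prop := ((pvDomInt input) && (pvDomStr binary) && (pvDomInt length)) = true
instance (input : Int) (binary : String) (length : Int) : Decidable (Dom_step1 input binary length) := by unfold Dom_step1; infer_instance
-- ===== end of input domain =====

-- B replaces A's running-subtraction loop by a positional algorithm: each output
-- element is computed independently as input minus the base-2 value of the suffix
-- of already-scanned bits (an alternative algorithm; return values proved equal).


-- ===== PORT A =====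
-- Literal port of A: one fold carrying (input, answer); on a '1' bit, subtract and append.
def step1 (input : Int) (binary : String) (length : Int) : List Int :=
  ((PySem.List.pyRange (length - 1) 0 (-1)).foldl
    (fun (st : Int × List Int) i =>
      if (PySem.Int.ofChars? [(PySem.Str.pyGet? binary i).getD ' ']).getD 0 = 1 then
        (st.1 - 2 ^ (length - i - 1).toNat, st.2 ++ [st.1 - 2 ^ (length - i - 1).toNat])
      else st)
    (input, [input])).2

-- ===== PORT B =====
-- Port of Source B's _binval: Horner evaluation of a bit list as a base-2 number.
def binvalB (bits : List Int) : Int := bits.foldl (fun v b => 2 * v + b) 0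

-- Port of B: build the 0/1 bit list of binary[:length] once, then each output
-- element is input minus the base-2 value of the bit suffix bits[i:].
def step1_alt (input : Int) (binary : String) (length : Int) : List Int :=
  let bits : List Int :=
    (PySem.List.slice binary.toList none (some length)).map (fun ch => if ch = '1' then (1 : Int) else 0)
  input :: (PySem.List.pyRange (length - 1) 0 (-1)).filterMap
    (fun i =>
      if (PySem.Str.pyGet? binary i).getD ' ' = '1' then
        some (input - binvalB (PySem.List.slice bits (some i) none))
      else none)

-- ===== PRECONDITION & SPEC =====
-- Pre_: every visited index 1 ≤ i < length must be in range and hold a digit,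
-- otherwise Python A raises IndexError/ValueError at int(binary[i]).
def Pre_step1 (input : Int) (binary : String) (length : Int) : Prop :=
  length ≤ 1 ∨
    (length ≤ (binary.length : Int) ∧
      ((binary.toList.take length.toNat).drop 1).all PySem.Chars.isdigit = true)
instance (input : Int) (binary : String) (length : Int) : Decidable (Pre_step1 input binary length) := by unfold Pre_step1; infer_instance
def pvWitness_step1 : Int × String × Int := (13, "1101", 4)
def Spec_step1 (input : Int) (binary : String) (length : Int) (out : List Int) : Prop := out = step1_alt input binary length
instance (input : Int) (binary : String) (length : Int) (out : List Int) : Decidable (Spec_step1 input binary length out) := by unfold Spec_step1; infer_instance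

-- ===== CLAIM (what is proved, stated in full; the proofs are below) =====
def Claim_equal_step1 : Prop := ∀ (input : Int) (binary : String) (length : Int), Dom_step1 input binary length → Pre_step1 input binary length → Spec_step1 input binary length (step1 input binary length)

-- ===== LEMMAS AND PROOFS =====

-- Horner fold with starting accumulator a shifts by 2^length.
theorem binvalB_foldl_shift (l : List Int) : ∀ a : Int,
    l.foldl (fun v b => 2 * v + b) a = a * 2 ^ l.length + binvalB l := by
  induction l with
  | nil => intro a; simp [binvalB]
  | cons b l ih =>
    intro a
    simp only [List.foldl_cons, List.length_cons, binvalB] at *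
    rw [ih (2 * a + b), ih (2 * 0 + b)]
    ring

-- Peeling one bit off the front of a suffix.
theorem binvalB_drop (bits : List Int) (i : Nat) (h : i < bits.length) :
    binvalB (bits.drop i) = bits[i] * 2 ^ (bits.length - i - 1) + binvalB (bits.drop (i + 1)) := by
  rw [List.drop_eq_getElem_cons h]
  show (bits.drop (i+1)).foldl (fun v b => 2 * v + b) (2 * 0 + bits[i]) = _
  rw [binvalB_foldl_shift]
  have : bits.length - (i + 1) = bits.length - i - 1 := by omega
  simp [List.length_drop, this]

-- int(c) == 1 for an ASCII digit c holds exactly for '1'.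
theorem ofChars?_digit_eq_one (c : Char) (h : PySem.Chars.isdigit c = true) :
    ((PySem.Int.ofChars? [c]).getD 0 = 1) ↔ c = '1' := by
  have hb : 48 ≤ c.toNat ∧ c.toNat ≤ 57 := by
    simp only [PySem.Chars.isdigit, Bool.and_eq_true, decide_eq_true_eq, Char.le_def] at h
    exact ⟨h.1, h.2⟩
  have hc : c = Char.ofNat c.toNat := (Char.ofNat_toNat c).symm
  obtain ⟨h1, h2⟩ := hb
  set n := c.toNat with hn
  rw [hc]
  interval_cases n <;> decide

-- Loop invariant: A's fold, started at the running value input - binvalB (bits.drop (k+1)),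
-- produces exactly B's per-element suffix values for indices k, k-1, …, 1.
theorem step1_loop (input : Int) (binary : String) (length : Int) (bits : List Int)
    (hlen : length ≤ (binary.toList.length : Int))
    (hblen : bits.length = length.toNat)
    (hbm : ∀ j : Nat, ∀ hj : j < bits.length, ∀ hj2 : j < binary.toList.length,
      bits[j] = if binary.toList[j] = '1' then (1 : Int) else 0)
    (hdig : ∀ j : Nat, 1 ≤ j → (j : Int) < length →
      ∀ (hj : j < binary.toList.length), PySem.Chars.isdigit binary.toList[j] = true) :
    ∀ (k : Nat), (k : Int) ≤ length - 1 → ∀ acc : List Int,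
      (PySem.List.pyRange (k : Int) 0 (-1)).foldl
        (fun (st : Int × List Int) i =>
          if (PySem.Int.ofChars? [(PySem.Str.pyGet? binary i).getD ' ']).getD 0 = 1 then
            (st.1 - 2 ^ (length - i - 1).toNat, st.2 ++ [st.1 - 2 ^ (length - i - 1).toNat])
          else st)
        (input - binvalB (bits.drop (k + 1)), acc)
      = (input - binvalB (bits.drop 1),
         acc ++ (PySem.List.pyRange (k : Int) 0 (-1)).filterMap
           (fun i =>
             if (PySem.Str.pyGet? binary i).getD ' ' = '1' then
               some (input - binvalB (PySem.List.slice bits (some i) none))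
             else none)) := by
  intro k
  induction k with
  | zero =>
    intro hk acc
    rw [PySem.List.pyRange_neg_one_eq_nil (by omega)]
    simp
  | succ m ih =>
    intro hk acc
    push_cast at hk
    have hmlt : m + 1 < binary.toList.length := by omega
    have hmb : m + 1 < bits.length := by omega
    have hstep : ((m + 1 : Nat) : Int) - 1 = ((m : Nat) : Int) := by push_cast; ring
    rw [PySem.List.pyRange_neg_one_cons (by omega), hstep]
    simp only [List.foldl_cons, List.filterMap_cons]
    have hgs : PySem.Str.pyGet? binary ((m + 1 : Nat) : Int) = some (binary.toList[m + 1]'hmlt) := by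
      rw [PySem.Str.pyGet?_natCast]
      exact List.getElem?_eq_getElem hmlt
    have hd : PySem.Chars.isdigit (binary.toList[m + 1]'hmlt) = true :=
      hdig (m + 1) (by omega) (by omega) hmlt
    have hiff := ofChars?_digit_eq_one _ hd
    have hbmv := hbm (m + 1) hmb hmlt
    have hslice : PySem.List.slice bits (some ((m + 1 : Nat) : Int)) none = bits.drop (m + 1) :=
      PySem.List.slice_from_natCast bits (m + 1)
    have hexp : (length - ((m + 1 : Nat) : Int) - 1).toNat = bits.length - (m + 1) - 1 := by
      omega
    have hdrop := binvalB_drop bits (m + 1) hmb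
    rw [hgs]
    simp only [Option.getD_some]
    by_cases hc : binary.toList[m + 1]'hmlt = '1'
    · rw [if_pos (hiff.mpr hc), if_pos hc, hslice]
      have hval : input - binvalB (bits.drop (m + 1 + 1)) - 2 ^ (length - ((m + 1 : Nat) : Int) - 1).toNat
          = input - binvalB (bits.drop (m + 1)) := by
        rw [hexp, hdrop, hbmv, if_pos hc]; ring
      rw [hval, ih (by omega) (acc ++ [input - binvalB (bits.drop (m + 1))])]
      simp
    · rw [if_neg (fun hh => hc (hiff.mp hh)), if_neg hc]
      have heq : binvalB (bits.drop (m + 1 + 1)) = binvalB (bits.drop (m + 1)) := by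
        rw [hdrop, hbmv, if_neg hc]; ring
      rw [heq, ih (by omega) acc]

-- ===== VERDICT (by name: the statement is the Claim_ definition above) =====
theorem step1_spec : Claim_equal_step1 := by
  intro input binary length _ hpre
  unfold Spec_step1 step1 step1_alt
  by_cases h1 : length ≤ 1
  · rw [PySem.List.pyRange_neg_one_eq_nil (by omega)]
    simp
  · rcases hpre with h | ⟨hlen0, hdig⟩
    · omega
    · have hTL : binary.toList.length = binary.length := by simp
      have hlen : length ≤ (binary.toList.length : Int) := by omega
      have hdig' : ∀ j : Nat, 1 ≤ j → (j : Int) < length →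
          ∀ (hj : j < binary.toList.length), PySem.Chars.isdigit binary.toList[j] = true := by
        intro j hj1 hj2 hj
        have hall := List.all_eq_true.mp hdig
        have hlt : j - 1 < ((binary.toList.take length.toNat).drop 1).length := by
          simp [List.length_take]; omega
        apply hall
        rw [List.mem_iff_getElem]
        refine ⟨j - 1, hlt, ?_⟩
        rw [List.getElem_drop, List.getElem_take]
        have hidx : 1 + (j - 1) = j := by omega
        simp [hidx]
      rw [PySem.List.slice_to binary.toList (by omega : (0 : Int) ≤ length)]
      have hblen : ((binary.toList.take length.toNat).map
          (fun ch => if ch = '1' then (1 : Int) else 0)).length = length.toNat := by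
        simp [List.length_take]; omega
      have hbm : ∀ j : Nat, ∀ hj : j < ((binary.toList.take length.toNat).map
            (fun ch => if ch = '1' then (1 : Int) else 0)).length,
          ∀ hj2 : j < binary.toList.length,
          ((binary.toList.take length.toNat).map
            (fun ch => if ch = '1' then (1 : Int) else 0))[j]
            = if binary.toList[j] = '1' then (1 : Int) else 0 := by
        intro j hj hj2
        simp [List.getElem_take]
      have hkc : length - 1 = (((length - 1).toNat : Nat) : Int) := by omega
      rw [hkc]
      have hnil : ((binary.toList.take length.toNat).map
          (fun ch => if ch = '1' then (1 : Int) else 0)).drop ((length - 1).toNat + 1) = [] := by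
        apply List.drop_eq_nil_of_le
        omega
      have h0 : ((input, ([input] : List Int)) : Int × List Int)
          = (input - binvalB (((binary.toList.take length.toNat).map
              (fun ch => if ch = '1' then (1 : Int) else 0)).drop ((length - 1).toNat + 1)), [input]) := by
        rw [hnil]; simp [binvalB]
      rw [h0, step1_loop input binary length _ hlen hblen hbm hdig' (length - 1).toNat (by omega) [input]]
      simp
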